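-- pv_equiv track=rewrite | github.com/Supermac30/PID-Accelerated-TD-Learning | Experiments/Plotting/plot_time.py | sorting_mechanism
-- ===== SOURCE A (Python) =====
-- def sorting_mechanism(files):
--     """Order files so that a file starting with "TD" or "Q Learning" or "Zap Q Learning" or "Speedy Q Learning" or "TIDBD" goes after anything else,
--     and sort those files in the corresponding order they appear afterwards.
--     """
--     td_files = []
--     q_learning_files = []
--     zap_q_learning_files = []
--     speedy_q_learning_files = []
--     tidbd_files = []
--     other_files = []
--
--     dont_compare = False
--
--     for file in files:
--         if file.startswith("TD"):
--             td_files.append(file)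
--         elif file.startswith("Q Learning"):
--             q_learning_files.append(file)
--         elif file.startswith("Zap Q Learning"):
--             zap_q_learning_files.append(file)
--         elif file.startswith("Speedy Q Learning"):
--             if dont_compare: continue
--             speedy_q_learning_files.append(file)
--         elif file.startswith("TIDBD"):
--             if dont_compare: continue
--             tidbd_files.append(file)
--         else:
--             other_files.append(file)
--
--     return other_files + td_files + q_learning_files + zap_q_learning_files + speedy_q_learning_files + tidbd_files
-- ===== SOURCE B (Python) =====
-- def sorting_mechanism(files):
--     def rank(file):
--         if file.startswith("TD"):
--             return 1
--         if file.startswith("Q Learning"):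
--             return 2
--         if file.startswith("Zap Q Learning"):
--             return 3
--         if file.startswith("Speedy Q Learning"):
--             return 4
--         if file.startswith("TIDBD"):
--             return 5
--         return 0
--     return sorted(files, key=rank)
-- ===== Notes on version B (the rewrite author's own statement) =====
-- stated objective: idiomatic
-- what changed: Replaced the six explicit bucket lists and final concatenation with a single stable sort by a category-rank key (sorted(files, key=rank)), relying on sort stability for in-bucket order.
import Mathlib
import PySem

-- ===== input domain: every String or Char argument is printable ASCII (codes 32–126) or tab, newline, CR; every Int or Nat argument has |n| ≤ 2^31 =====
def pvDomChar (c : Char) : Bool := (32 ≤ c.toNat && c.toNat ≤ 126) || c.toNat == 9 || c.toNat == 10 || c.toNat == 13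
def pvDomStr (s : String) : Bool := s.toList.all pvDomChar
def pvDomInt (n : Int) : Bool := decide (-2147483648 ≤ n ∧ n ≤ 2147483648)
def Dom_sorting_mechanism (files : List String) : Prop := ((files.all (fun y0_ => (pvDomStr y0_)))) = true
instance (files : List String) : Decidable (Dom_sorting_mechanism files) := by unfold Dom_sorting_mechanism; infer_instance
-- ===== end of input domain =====

-- B replaces A's six explicit bucket lists + concatenation by one stable sort with a category-rank key (idiomatic; same result).

-- ===== PORT A =====
-- one pass appending each file to one of six bucket lists, then concatenation (dontCompare is A's constant False)
def sorting_mechanism (files : List String) : List String :=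
  let dontCompare := false
  let st := files.foldl
    (fun (acc : List String × List String × List String × List String × List String × List String) file =>
      let (td, q, zap, sp, ti, other) := acc
      if PySem.Str.startswith file "TD" then (td ++ [file], q, zap, sp, ti, other)
      else if PySem.Str.startswith file "Q Learning" then (td, q ++ [file], zap, sp, ti, other)
      else if PySem.Str.startswith file "Zap Q Learning" then (td, q, zap ++ [file], sp, ti, other)
      else if PySem.Str.startswith file "Speedy Q Learning" then
        if dontCompare then acc else (td, q, zap, sp ++ [file], ti, other)
      else if PySem.Str.startswith file "TIDBD" then
        if dontCompare then acc else (td, q, zap, sp, ti ++ [file], other)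
      else (td, q, zap, sp, ti, other ++ [file]))
    ([], [], [], [], [], [])
  st.2.2.2.2.2 ++ st.1 ++ st.2.1 ++ st.2.2.1 ++ st.2.2.2.1 ++ st.2.2.2.2.1

-- ===== PORT B =====
-- the key function of Source B
def pvRank (file : String) : Int :=
  if PySem.Str.startswith file "TD" then 1
  else if PySem.Str.startswith file "Q Learning" then 2
  else if PySem.Str.startswith file "Zap Q Learning" then 3
  else if PySem.Str.startswith file "Speedy Q Learning" then 4
  else if PySem.Str.startswith file "TIDBD" then 5
  else 0

def sorting_mechanism_alt (files : List String) : List String :=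
  PySem.List.sorted files pvRank

-- ===== PRECONDITION & SPEC =====
def Spec_sorting_mechanism (files : List String) (out : List String) : Prop := out = sorting_mechanism_alt files
instance (files : List String) (out : List String) : Decidable (Spec_sorting_mechanism files out) := by unfold Spec_sorting_mechanism; infer_instance

-- ===== CLAIM (what is proved, stated in full; the proofs are below) =====
def Claim_equal_sorting_mechanism : Prop := ∀ (files : List String), Dom_sorting_mechanism files → Spec_sorting_mechanism files (sorting_mechanism files)

-- ===== LEMMAS AND PROOFS =====

-- the canonical form both programs compute: files filtered per rank, in rank order
def pvBucket (i : Int) (p : List String) : List String := p.filter (fun y => pvRank y = i)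

def pvCanon (p : List String) : List String :=
  pvBucket 0 p ++ pvBucket 1 p ++ pvBucket 2 p ++ pvBucket 3 p ++ pvBucket 4 p ++ pvBucket 5 p

theorem pvRank_cases (f : String) :
    pvRank f = 0 ∨ pvRank f = 1 ∨ pvRank f = 2 ∨ pvRank f = 3 ∨ pvRank f = 4 ∨ pvRank f = 5 := by
  unfold pvRank; split_ifs <;> simp

theorem mem_pvBucket {i : Int} {p : List String} {y : String} (hy : y ∈ pvBucket i p) :
    pvRank y = i := by
  simpa [pvBucket] using (List.of_mem_filter hy)

theorem insertBy_split {α : Type} (before : α → α → Bool) (x : α) (ys1 ys2 : List α)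
    (h1 : ∀ y ∈ ys1, before x y = false) (h2 : ∀ y ∈ ys2, before x y = true) :
    PySem.List.insertBy before x (ys1 ++ ys2) = ys1 ++ x :: ys2 := by
  induction ys1 with
  | nil =>
    cases ys2 with
    | nil => rfl
    | cons y t => simp [PySem.List.insertBy, h2 y (by simp)]
  | cons y t ih =>
    simp only [List.cons_append, PySem.List.insertBy, h1 y (by simp)]
    simp only [Bool.false_eq_true, if_false, List.cons.injEq, true_and]
    exact ih (fun z hz => h1 z (by simp [hz]))

theorem insert_join (f : String) (p : List String) (L1 L2 : List Int)
    (h1 : ∀ i ∈ L1, ¬ pvRank f < i) (h2 : ∀ i ∈ L2, pvRank f < i) :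
    PySem.List.insertBy (fun a b => decide (pvRank a < pvRank b)) f
        (((L1 ++ L2).map (fun i => pvBucket i p)).flatten)
      = ((L1.map (fun i => pvBucket i p)).flatten) ++ f :: ((L2.map (fun i => pvBucket i p)).flatten) := by
  rw [List.map_append, List.flatten_append]
  apply insertBy_split
  · intro y hy
    simp only [List.mem_flatten, List.mem_map] at hy
    obtain ⟨l, ⟨i, hi, rfl⟩, hyl⟩ := hy
    have := mem_pvBucket hyl
    simp [this]
    exact Int.not_lt.mp (h1 i hi)
  · intro y hy
    simp only [List.mem_flatten, List.mem_map] at hy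
    obtain ⟨l, ⟨i, hi, rfl⟩, hyl⟩ := hy
    have := mem_pvBucket hyl
    simp [this]
    exact h2 i hi

theorem pvBucket_append_single (i : Int) (p : List String) (f : String) :
    pvBucket i (p ++ [f]) = pvBucket i p ++ (if pvRank f = i then [f] else []) := by
  simp [pvBucket, List.filter_append, List.filter_cons]

theorem step_insert (p : List String) (f : String) :
    PySem.List.insertBy (fun a b => decide (pvRank a < pvRank b)) f (pvCanon p)
      = pvCanon (p ++ [f]) := by
  have hcanon : pvCanon p = ((([0,1,2,3,4,5] : List Int)).map (fun i => pvBucket i p)).flatten := by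
    simp [pvCanon]
  rcases pvRank_cases f with h|h|h|h|h|h
  · rw [hcanon, show ([0,1,2,3,4,5] : List Int) = [0] ++ [1,2,3,4,5] from rfl,
      insert_join f p _ _ (by intro i hi; simp at hi; omega) (by intro i hi; simp at hi; omega)]
    simp [pvCanon, pvBucket_append_single, h]
  · rw [hcanon, show ([0,1,2,3,4,5] : List Int) = [0,1] ++ [2,3,4,5] from rfl,
      insert_join f p _ _ (by intro i hi; simp at hi; omega) (by intro i hi; simp at hi; omega)]
    simp [pvCanon, pvBucket_append_single, h]
  · rw [hcanon, show ([0,1,2,3,4,5] : List Int) = [0,1,2] ++ [3,4,5] from rfl,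
      insert_join f p _ _ (by intro i hi; simp at hi; omega) (by intro i hi; simp at hi; omega)]
    simp [pvCanon, pvBucket_append_single, h]
  · rw [hcanon, show ([0,1,2,3,4,5] : List Int) = [0,1,2,3] ++ [4,5] from rfl,
      insert_join f p _ _ (by intro i hi; simp at hi; omega) (by intro i hi; simp at hi; omega)]
    simp [pvCanon, pvBucket_append_single, h]
  · rw [hcanon, show ([0,1,2,3,4,5] : List Int) = [0,1,2,3,4] ++ [5] from rfl,
      insert_join f p _ _ (by intro i hi; simp at hi; omega) (by intro i hi; simp at hi; omega)]
    simp [pvCanon, pvBucket_append_single, h]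
  · rw [hcanon, show ([0,1,2,3,4,5] : List Int) = [0,1,2,3,4,5] ++ [] from rfl,
      insert_join f p _ _ (by intro i hi; simp at hi; omega) (by intro i hi; simp at hi)]
    simp [pvCanon, pvBucket_append_single, h]

theorem foldl_insert (files p : List String) :
    files.foldl (fun acc x => PySem.List.insertBy (fun a b => decide (pvRank a < pvRank b)) x acc)
        (pvCanon p)
      = pvCanon (p ++ files) := by
  induction files generalizing p with
  | nil => simp
  | cons f fs ih =>
    simp only [List.foldl_cons, step_insert]
    rw [ih (p ++ [f])]
    simp

theorem alt_eq_canon (files : List String) : sorting_mechanism_alt files = pvCanon files := by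
  unfold sorting_mechanism_alt
  rw [PySem.List.sorted_eq_foldl_insertBy]
  have h := foldl_insert files []
  simpa [pvCanon, pvBucket] using h

theorem a_foldl (files td q zap sp ti other : List String) :
    files.foldl
      (fun (acc : List String × List String × List String × List String × List String × List String) file =>
        let (td, q, zap, sp, ti, other) := acc
        if PySem.Str.startswith file "TD" then (td ++ [file], q, zap, sp, ti, other)
        else if PySem.Str.startswith file "Q Learning" then (td, q ++ [file], zap, sp, ti, other)
        else if PySem.Str.startswith file "Zap Q Learning" then (td, q, zap ++ [file], sp, ti, other)
        else if PySem.Str.startswith file "Speedy Q Learning" then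
          if false then acc else (td, q, zap, sp ++ [file], ti, other)
        else if PySem.Str.startswith file "TIDBD" then
          if false then acc else (td, q, zap, sp, ti ++ [file], other)
        else (td, q, zap, sp, ti, other ++ [file]))
      (td, q, zap, sp, ti, other)
      = (td ++ pvBucket 1 files, q ++ pvBucket 2 files, zap ++ pvBucket 3 files,
         sp ++ pvBucket 4 files, ti ++ pvBucket 5 files, other ++ pvBucket 0 files) := by
  induction files generalizing td q zap sp ti other with
  | nil => simp [pvBucket]
  | cons f fs ih =>
    by_cases h1 : PySem.Str.startswith f "TD"
    · have hr : pvRank f = 1 := by unfold pvRank; rw [if_pos h1]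
      simp only [List.foldl_cons, h1, if_true]
      rw [ih]
      simp [pvBucket, hr, List.append_assoc]
    · by_cases h2 : PySem.Str.startswith f "Q Learning"
      · have hr : pvRank f = 2 := by unfold pvRank; rw [if_neg h1, if_pos h2]
        simp only [List.foldl_cons, h1, h2, if_true]
        rw [ih]
        simp [pvBucket, hr, List.append_assoc]
      · by_cases h3 : PySem.Str.startswith f "Zap Q Learning"
        · have hr : pvRank f = 3 := by unfold pvRank; rw [if_neg h1, if_neg h2, if_pos h3]
          simp only [List.foldl_cons, h1, h2, h3, if_true]
          rw [ih]
          simp [pvBucket, hr, List.append_assoc]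
        · by_cases h4 : PySem.Str.startswith f "Speedy Q Learning"
          · have hr : pvRank f = 4 := by unfold pvRank; rw [if_neg h1, if_neg h2, if_neg h3, if_pos h4]
            simp only [List.foldl_cons, h1, h2, h3, h4, if_true]
            rw [ih]
            simp [pvBucket, hr, List.append_assoc]
          · by_cases h5 : PySem.Str.startswith f "TIDBD"
            · have hr : pvRank f = 5 := by unfold pvRank; rw [if_neg h1, if_neg h2, if_neg h3, if_neg h4, if_pos h5]
              simp only [List.foldl_cons, h1, h2, h3, h4, h5, if_true]
              rw [ih]
              simp [pvBucket, hr, List.append_assoc]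
            · have hr : pvRank f = 0 := by
                unfold pvRank; rw [if_neg h1, if_neg h2, if_neg h3, if_neg h4, if_neg h5]
              simp only [List.foldl_cons, h1, h2, h3, h4, h5]
              rw [ih]
              simp [pvBucket, hr, List.append_assoc]

theorem a_eq_canon (files : List String) : sorting_mechanism files = pvCanon files := by
  unfold sorting_mechanism
  simp only [a_foldl]
  simp [pvCanon]

-- ===== VERDICT (by name: the statement is the Claim_ definition above) =====
theorem sorting_mechanism_spec : Claim_equal_sorting_mechanism := by
  intro files _
  unfold Spec_sorting_mechanism
  rw [a_eq_canon, alt_eq_canon]
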